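-- pv_equiv track=rewrite | github.com/obadahmh/ontological-cbm | src/concepts/aggregation.py | classify_semantic_type
-- ===== SOURCE A (Python) =====
-- from typing import Any, Dict, Iterable, List, Mapping, MutableMapping, Optional, Sequence, Tuple
--
-- DEVICE_STY = {"T074", "T075", "T121", "T122", "T123", "T203"}
--
-- FINDING_STY = {"T033", "T037", "T040", "T041", "T042", "T047", "T048", "T049", "T184", "T191"}
--
-- ANATOMY_STY = {"T017", "T021", "T023", "T029", "T030", "T031", "T082"}
--
-- def classify_semantic_type(sty_codes: Iterable[str]) -> Tuple[str, str]:
--     sty_set = set(sty_codes)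
--     if any(code in DEVICE_STY for code in sty_set):
--         return "Device", "device"
--     if any(code in FINDING_STY for code in sty_set):
--         return "Finding", "finding"
--     if any(code in ANATOMY_STY for code in sty_set):
--         return "BodyStructure", "anatomy_scaffold"
--     return "Finding", "finding"
-- ===== SOURCE B (Python) =====
-- DEVICE_STY = {"T074", "T075", "T121", "T122", "T123", "T203"}
-- FINDING_STY = {"T033", "T037", "T040", "T041", "T042", "T047", "T048", "T049", "T184", "T191"}
-- ANATOMY_STY = {"T017", "T021", "T023", "T029", "T030", "T031", "T082"}
--
-- _RESULTS = [("Device", "device"), ("Finding", "finding"),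
--             ("BodyStructure", "anatomy_scaffold"), ("Finding", "finding")]
--
--
-- def _priority(code):
--     if code in DEVICE_STY:
--         return 0
--     if code in FINDING_STY:
--         return 1
--     if code in ANATOMY_STY:
--         return 2
--     return 3
--
--
-- def classify_semantic_type(sty_codes):
--     best = 3
--     for code in sty_codes:
--         p = _priority(code)
--         if p < best:
--             best = p
--     return _RESULTS[best]
-- ===== Notes on version B (the rewrite author's own statement) =====
-- stated objective: idiomatic
-- what changed: Replaced set-building plus three sequential any-membership scans by a single pass over the codes that keeps the minimum category priority (Device=0, Finding=1, Anatomy=2, none=3) and indexes a result table, whose entry 3 is the Finding default.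
import Mathlib
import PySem

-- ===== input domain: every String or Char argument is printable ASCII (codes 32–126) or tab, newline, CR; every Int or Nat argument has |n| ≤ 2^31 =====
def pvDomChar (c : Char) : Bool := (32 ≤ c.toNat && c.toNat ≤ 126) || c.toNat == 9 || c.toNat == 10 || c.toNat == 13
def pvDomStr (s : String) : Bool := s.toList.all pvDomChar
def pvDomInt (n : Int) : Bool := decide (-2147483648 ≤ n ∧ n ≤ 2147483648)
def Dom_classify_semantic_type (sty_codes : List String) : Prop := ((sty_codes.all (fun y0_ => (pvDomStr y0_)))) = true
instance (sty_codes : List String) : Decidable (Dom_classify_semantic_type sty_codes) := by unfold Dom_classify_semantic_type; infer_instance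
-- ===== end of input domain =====

-- B replaces the three sequential any-scans over a set by one pass keeping the
-- minimum category priority (Device=0, Finding=1, Anatomy=2, none=3) plus a result table (idiomatic; same O(n) cost).


-- module constants shared by both Pythons
def DEVICE_STY : PySem.Set String :=
  PySem.Set.ofList ["T074", "T075", "T121", "T122", "T123", "T203"]
def FINDING_STY : PySem.Set String :=
  PySem.Set.ofList ["T033", "T037", "T040", "T041", "T042", "T047", "T048", "T049", "T184", "T191"]
def ANATOMY_STY : PySem.Set String :=
  PySem.Set.ofList ["T017", "T021", "T023", "T029", "T030", "T031", "T082"]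

-- ===== PORT A =====
def classify_semantic_type (sty_codes : List String) : String × String :=
  let sty_set : PySem.Set String := PySem.Set.ofList sty_codes
  if sty_set.any (fun code => DEVICE_STY.contains code) then ("Device", "device")
  else if sty_set.any (fun code => FINDING_STY.contains code) then ("Finding", "finding")
  else if sty_set.any (fun code => ANATOMY_STY.contains code) then ("BodyStructure", "anatomy_scaffold")
  else ("Finding", "finding")

-- ===== PORT B =====
def pvResults : List (String × String) :=
  [("Device", "device"), ("Finding", "finding"),
   ("BodyStructure", "anatomy_scaffold"), ("Finding", "finding")]

def pvPriority (code : String) : Int :=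
  if DEVICE_STY.contains code then 0
  else if FINDING_STY.contains code then 1
  else if ANATOMY_STY.contains code then 2
  else 3

-- the loop body of B's single pass
def pvStep (best : Int) (code : String) : Int :=
  if pvPriority code < best then pvPriority code else best

def classify_semantic_type_alt (sty_codes : List String) : String × String :=
  let best := sty_codes.foldl pvStep 3
  match PySem.List.pyGet? pvResults best with
  | some r => r
  | none => ("Finding", "finding")   -- unreachable: best is always 0..3

-- ===== PRECONDITION & SPEC =====
def Spec_classify_semantic_type (sty_codes : List String) (out : String × String) : Prop := out = classify_semantic_type_alt sty_codes
instance (sty_codes : List String) (out : String × String) : Decidable (Spec_classify_semantic_type sty_codes out) := by unfold Spec_classify_semantic_type; infer_instance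

-- ===== CLAIM (what is proved, stated in full; the proofs are below) =====
def Claim_equal_classify_semantic_type : Prop := ∀ (sty_codes : List String), Dom_classify_semantic_type sty_codes → Spec_classify_semantic_type sty_codes (classify_semantic_type sty_codes)

-- ===== LEMMAS AND PROOFS =====

lemma any_ofList (l : List String) (p : String → Bool) :
    (PySem.Set.ofList l).any p = l.any p := by
  rw [Bool.eq_iff_iff]
  simp only [List.any_eq_true]
  constructor
  · rintro ⟨x, hx, hp⟩; exact ⟨x, (PySem.Set.mem_ofList _ _).1 hx, hp⟩
  · rintro ⟨x, hx, hp⟩; exact ⟨x, (PySem.Set.mem_ofList _ _).2 hx, hp⟩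

lemma pvPriority_nonneg (c : String) : 0 ≤ pvPriority c := by
  unfold pvPriority; split_ifs <;> norm_num

lemma fold_le (l : List String) : ∀ b : Int, l.foldl pvStep b ≤ b := by
  induction l with
  | nil => intro b; simp
  | cons c t ih =>
    intro b
    have h1 : pvStep b c ≤ b := by unfold pvStep; split_ifs with h <;> omega
    calc (c :: t).foldl pvStep b = t.foldl pvStep (pvStep b c) := rfl
      _ ≤ pvStep b c := ih _
      _ ≤ b := h1

lemma fold_le_mem (l : List String) : ∀ (b : Int) (c : String), c ∈ l →
    l.foldl pvStep b ≤ pvPriority c := by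
  induction l with
  | nil => intro _ _ h; cases h
  | cons x t ih =>
    intro b c hc
    rcases List.mem_cons.1 hc with h | h
    · subst h
      have h2 : pvStep b c ≤ pvPriority c := by unfold pvStep; split_ifs with h <;> omega
      calc (c :: t).foldl pvStep b = t.foldl pvStep (pvStep b c) := rfl
        _ ≤ pvStep b c := fold_le t _
        _ ≤ pvPriority c := h2
    · exact ih _ c h

lemma fold_lb (l : List String) : ∀ (b m : Int), m ≤ b →
    (∀ c ∈ l, m ≤ pvPriority c) → m ≤ l.foldl pvStep b := by
  induction l with
  | nil => intro b m hb _; simpa using hb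
  | cons x t ih =>
    intro b m hb hall
    have hx : m ≤ pvPriority x := hall x (List.mem_cons_self ..)
    have hstep : m ≤ pvStep b x := by unfold pvStep; split_ifs with h <;> omega
    exact ih _ m hstep (fun c hc => hall c (List.mem_cons_of_mem _ hc))

lemma pvPriority_eq_zero {c : String} (h : c ∈ DEVICE_STY) :
    pvPriority c = 0 := by unfold pvPriority; simp [h]

lemma pvPriority_eq_one {c : String} (hd : c ∉ DEVICE_STY)
    (h : c ∈ FINDING_STY) : pvPriority c = 1 := by
  unfold pvPriority; simp [hd, h]

lemma pvPriority_eq_two {c : String} (hd : c ∉ DEVICE_STY)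
    (hf : c ∉ FINDING_STY) (h : c ∈ ANATOMY_STY) :
    pvPriority c = 2 := by unfold pvPriority; simp [hd, hf, h]

lemma pvPriority_ge_one {c : String} (hd : c ∉ DEVICE_STY) :
    1 ≤ pvPriority c := by
  unfold pvPriority
  have h0 : DEVICE_STY.contains c = false := by simpa using hd
  rw [h0]
  simp only [Bool.false_eq_true, if_false]
  split_ifs <;> norm_num

lemma pvPriority_ge_two {c : String} (hd : c ∉ DEVICE_STY)
    (hf : c ∉ FINDING_STY) : 2 ≤ pvPriority c := by
  unfold pvPriority
  have h0 : DEVICE_STY.contains c = false := by simpa using hd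
  have h1 : FINDING_STY.contains c = false := by simpa using hf
  rw [h0, h1]
  simp only [Bool.false_eq_true, if_false]
  split_ifs <;> norm_num

lemma pvPriority_eq_three {c : String} (hd : c ∉ DEVICE_STY)
    (hf : c ∉ FINDING_STY) (ha : c ∉ ANATOMY_STY) :
    pvPriority c = 3 := by unfold pvPriority; simp [hd, hf, ha]

-- ===== VERDICT (by name: the statement is the Claim_ definition above) =====
theorem classify_semantic_type_spec : Claim_equal_classify_semantic_type := by
  intro l _
  unfold Spec_classify_semantic_type classify_semantic_type classify_semantic_type_alt
  simp only [any_ofList]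
  cases hd : l.any (fun code => DEVICE_STY.contains code) with
  | true =>
    obtain ⟨c, hc, hp⟩ := List.any_eq_true.1 hd
    have hmem : c ∈ DEVICE_STY := by simpa using hp
    have hle : l.foldl pvStep 3 ≤ 0 := by
      have h := fold_le_mem l 3 c hc; rwa [pvPriority_eq_zero hmem] at h
    have hge : (0 : Int) ≤ l.foldl pvStep 3 :=
      fold_lb l 3 0 (by norm_num) (fun c _ => pvPriority_nonneg c)
    have hb : l.foldl pvStep 3 = 0 := le_antisymm hle hge
    simp only [if_true, hb]
    decide
  | false =>
    have hd' : ∀ c ∈ l, c ∉ DEVICE_STY := by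
      intro c hc
      have h := List.any_eq_false.1 hd c hc
      simpa using h
    simp only [Bool.false_eq_true, if_false]
    cases hf : l.any (fun code => FINDING_STY.contains code) with
    | true =>
      obtain ⟨c, hc, hp⟩ := List.any_eq_true.1 hf
      have hmem : c ∈ FINDING_STY := by simpa using hp
      have hle : l.foldl pvStep 3 ≤ 1 := by
        have h := fold_le_mem l 3 c hc
        rwa [pvPriority_eq_one (hd' c hc) hmem] at h
      have hge : (1 : Int) ≤ l.foldl pvStep 3 :=
        fold_lb l 3 1 (by norm_num) (fun c hc => pvPriority_ge_one (hd' c hc))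
      have hb : l.foldl pvStep 3 = 1 := le_antisymm hle hge
      simp only [if_true, hb]
      decide
    | false =>
      have hf' : ∀ c ∈ l, c ∉ FINDING_STY := by
        intro c hc
        have h := List.any_eq_false.1 hf c hc
        simpa using h
      simp only [Bool.false_eq_true, if_false]
      cases ha : l.any (fun code => ANATOMY_STY.contains code) with
      | true =>
        obtain ⟨c, hc, hp⟩ := List.any_eq_true.1 ha
        have hmem : c ∈ ANATOMY_STY := by simpa using hp
        have hle : l.foldl pvStep 3 ≤ 2 := by
          have h := fold_le_mem l 3 c hc
          rwa [pvPriority_eq_two (hd' c hc) (hf' c hc) hmem] at h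
        have hge : (2 : Int) ≤ l.foldl pvStep 3 :=
          fold_lb l 3 2 (by norm_num)
            (fun c hc => pvPriority_ge_two (hd' c hc) (hf' c hc))
        have hb : l.foldl pvStep 3 = 2 := le_antisymm hle hge
        simp only [if_true, hb]
        decide
      | false =>
        have ha' : ∀ c ∈ l, c ∉ ANATOMY_STY := by
          intro c hc
          have h := List.any_eq_false.1 ha c hc
          simpa using h
        have hle : l.foldl pvStep 3 ≤ 3 := fold_le l 3
        have hge : (3 : Int) ≤ l.foldl pvStep 3 :=
          fold_lb l 3 3 le_rfl (fun c hc =>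
            le_of_eq (pvPriority_eq_three (hd' c hc) (hf' c hc) (ha' c hc)).symm)
        have hb : l.foldl pvStep 3 = 3 := le_antisymm hle hge
        simp only [Bool.false_eq_true, if_false, hb]
        decide
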